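-- pv_equiv track=rewrite | github.com/TechnicalDree/Sudoku | fast_solve.py | areLegalValues
-- ===== SOURCE A (Python) =====
-- def areLegalValues(L):
--     n = len(L)
--     seen = set()
--
--     for value in L:
--         if (type(value) != int):
--             return False
--         if value < 0 or value > n:
--             return False
--         if value != 0 and value in seen:
--             return False
--         seen.add(value)
--     return True
-- ===== SOURCE B (Python) =====
-- def areLegalValues(L):
--     n = len(L)
--     for value in L:
--         if type(value) != int or value < 0 or value > n:
--             return False
--     nonzero = [v for v in L if v != 0]
--     return len(nonzero) == len(set(nonzero))
-- ===== Notes on version B (the rewrite author's own statement) =====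
-- stated objective: alternative
-- what changed: Replaces the single interleaved scan with a per-element seen-set membership test by two separate passes: a range-validation loop, then a batch duplicate check comparing len(nonzero) with len(set(nonzero)).
import Mathlib
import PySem

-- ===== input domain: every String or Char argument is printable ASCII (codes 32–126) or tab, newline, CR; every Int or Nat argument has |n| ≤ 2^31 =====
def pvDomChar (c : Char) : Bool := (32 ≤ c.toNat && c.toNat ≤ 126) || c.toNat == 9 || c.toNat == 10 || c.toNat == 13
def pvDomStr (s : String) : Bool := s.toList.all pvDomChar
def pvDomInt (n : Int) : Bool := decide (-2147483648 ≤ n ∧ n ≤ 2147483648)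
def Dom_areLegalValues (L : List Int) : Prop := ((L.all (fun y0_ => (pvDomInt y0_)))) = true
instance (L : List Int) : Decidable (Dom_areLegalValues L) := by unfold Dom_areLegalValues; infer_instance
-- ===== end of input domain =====

-- B replaces A's single interleaved scan (per-element seen-set membership test) by two passes:
-- a range-validation loop, then a batch duplicate check via len(nonzero) == len(set(nonzero)).


-- ===== PORT A =====
-- A's loop: early return on range violation, else on nonzero duplicate against 'seen', else add to 'seen'.
def areLegalValuesAux (n : Int) (seen : PySem.Set Int) : List Int → Bool
  | [] => true
  | v :: rest =>
    if v < 0 ∨ v > n then false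
    else if v ≠ 0 ∧ PySem.Set.contains seen v then false
    else areLegalValuesAux n (PySem.Set.add seen v) rest

def areLegalValues (L : List Int) : Bool :=
  areLegalValuesAux (L.length : Int) PySem.Set.empty L

-- ===== PORT B =====
-- first pass: only type/range validation (the type test is vacuous under the List Int convention)
def rangeOKAux (n : Int) : List Int → Bool
  | [] => true
  | v :: rest => if v < 0 ∨ v > n then false else rangeOKAux n rest

def areLegalValues_alt (L : List Int) : Bool :=
  if rangeOKAux (L.length : Int) L then
    let nonzero := L.filter (fun v => v != 0)
    nonzero.length == (PySem.Set.ofList nonzero).length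
  else false

-- ===== PRECONDITION & SPEC =====
def Spec_areLegalValues (L : List Int) (out : Bool) : Prop := out = areLegalValues_alt L
instance (L : List Int) (out : Bool) : Decidable (Spec_areLegalValues L out) := by unfold Spec_areLegalValues; infer_instance

-- ===== CLAIM (what is proved, stated in full; the proofs are below) =====
def Claim_equal_areLegalValues : Prop := ∀ (L : List Int), Dom_areLegalValues L → Spec_areLegalValues L (areLegalValues L)

-- ===== LEMMAS AND PROOFS =====

-- a list with a repetition loses length under set(·)
lemma ofList_length_lt_of_not_nodup (xs : List Int) (h : ¬ xs.Nodup) :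
    (PySem.Set.ofList xs).length < xs.length := by
  induction xs with
  | nil => simp at h
  | cons x xs ih =>
    rw [PySem.Set.ofList_cons]
    simp only [List.nodup_cons, not_and_or] at h
    rcases h with hx | hnd
    · push Not at hx
      rcases Classical.em xs.Nodup with hnd | hnd
      · rw [PySem.Set.ofList_eq_self_of_nodup xs hnd]
        have : (PySem.Set.discard xs x).length < xs.length := by
          unfold PySem.Set.discard
          rw [List.length_filter_lt_length_iff_exists]
          exact ⟨x, hx, by simp⟩
        simpa using this
      · have h1 := ih hnd
        have h2 : (PySem.Set.discard (PySem.Set.ofList xs) x).length ≤ (PySem.Set.ofList xs).length :=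
          List.length_filter_le _ _
        simp only [List.length_cons]
        omega
    · have h1 := ih hnd
      have h2 : (PySem.Set.discard (PySem.Set.ofList xs) x).length ≤ (PySem.Set.ofList xs).length :=
        List.length_filter_le _ _
      simp only [List.length_cons]
      omega

lemma length_eq_ofList_iff (xs : List Int) :
    (xs.length = (PySem.Set.ofList xs).length) ↔ xs.Nodup := by
  constructor
  · intro h
    by_contra hnd
    have := ofList_length_lt_of_not_nodup xs hnd
    omega
  · intro h; rw [PySem.Set.ofList_eq_self_of_nodup xs h]

-- characterization of A's interleaved loop, generalized over 'seen'
lemma aux_iff (n : Int) : ∀ (L : List Int) (seen : PySem.Set Int),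
    (areLegalValuesAux n seen L = true ↔
      rangeOKAux n L = true ∧ (L.filter (fun v => v != 0)).Nodup ∧
        ∀ v ∈ L, v ≠ 0 → v ∉ seen) := by
  intro L
  induction L with
  | nil => intro seen; simp [areLegalValuesAux, rangeOKAux]
  | cons v rest ih =>
    intro seen
    simp only [areLegalValuesAux, rangeOKAux, List.filter_cons]
    by_cases hr : v < 0 ∨ v > n
    · rw [if_pos hr, if_pos hr]; simp
    · rw [if_neg hr, if_neg hr]
      by_cases hdup : v ≠ 0 ∧ PySem.Set.contains seen v
      · rw [if_pos hdup]
        constructor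
        · intro h; simp at h
        · rintro ⟨h1, h2, h3⟩
          exact absurd (h3 v (by simp) hdup.1) (by
            simpa [PySem.Set.contains_iff] using hdup.2)
      · rw [if_neg hdup]
        rw [ih (PySem.Set.add seen v)]
        by_cases hv : v = 0
        · subst hv
          simp only [bne_self_eq_false, Bool.false_eq_true,
            List.mem_cons, ne_eq]
          constructor
          · rintro ⟨h1, h2, h3⟩
            refine ⟨h1, by simpa using h2, ?_⟩
            rintro w (rfl | hw) hw0
            · exact absurd rfl hw0
            · exact fun hmem => (h3 w hw hw0) (by simp [PySem.Set.mem_add, hmem])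
          · rintro ⟨h1, h2, h3⟩
            refine ⟨h1, by simpa using h2, ?_⟩
            intro w hw hw0 hmem
            rcases (PySem.Set.mem_add _ _ _).1 hmem with h | rfl
            · exact h3 w (Or.inr hw) hw0 h
            · exact hw0 rfl
        · have hvb : (v != 0) = true := by simp [hv]
          simp only [hvb, if_pos, List.nodup_cons, List.mem_cons, ne_eq]
          push Not at hdup
          have hvs : v ∉ seen := by
            intro hmem
            exact absurd (by simpa [PySem.Set.contains_iff] using hmem) (by
              simpa using hdup hv)
          constructor
          · rintro ⟨h1, h2, h3⟩
            refine ⟨h1, ⟨?_, h2⟩, ?_⟩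
            · intro hmem
              have hw : v ∈ rest := List.mem_of_mem_filter hmem
              exact (h3 v hw hv) (by simp [PySem.Set.mem_add _ _ _])
            · rintro w (rfl | hw) hw0
              · exact hvs
              · exact fun hmem => (h3 w hw hw0) (by simp [PySem.Set.mem_add, hmem])
          · rintro ⟨h1, ⟨hnm, h2⟩, h3⟩
            refine ⟨h1, h2, ?_⟩
            intro w hw hw0 hmem
            rcases (PySem.Set.mem_add _ _ _).1 hmem with h | rfl
            · exact h3 w (Or.inr hw) hw0 h
            · exact hnm (List.mem_filter.2 ⟨hw, by simp [hw0]⟩)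

lemma main_eq (L : List Int) : areLegalValues L = areLegalValues_alt L := by
  rw [Bool.eq_iff_iff]
  unfold areLegalValues areLegalValues_alt
  rw [aux_iff]
  by_cases hr : rangeOKAux (L.length : Int) L = true
  · simp only [hr, if_pos, true_and, beq_iff_eq]
    rw [length_eq_ofList_iff]
    constructor
    · rintro ⟨h, _⟩; exact h
    · intro h; exact ⟨h, by simp [PySem.Set.empty]⟩
  · simp [hr]

-- ===== VERDICT (by name: the statement is the Claim_ definition above) =====
theorem areLegalValues_spec : Claim_equal_areLegalValues := by
  intro L _
  unfold Spec_areLegalValues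
  exact main_eq L
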